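-- pv_equiv track=rewrite | github.com/Harry3723/github-project-push | src/github_project_push/pushplus.py | chunk_markdown_by_bytes
-- ===== SOURCE A (Python) =====
-- def chunk_markdown_by_bytes(content: str, max_bytes: int) -> list[str]:
--     if len(content.encode("utf-8")) <= max_bytes:
--         return [content]
--
--     paragraphs = content.split("\n\n")
--     chunks: list[str] = []
--     current: list[str] = []
--
--     for paragraph in paragraphs:
--         candidate = "\n\n".join(current + [paragraph]) if current else paragraph
--         if len(candidate.encode("utf-8")) <= max_bytes:
--             current.append(paragraph)
--             continue
--         if current:
--             chunks.append("\n\n".join(current))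
--             current = []
--         if len(paragraph.encode("utf-8")) <= max_bytes:
--             current = [paragraph]
--             continue
--         text = paragraph
--         start = 0
--         while start < len(text):
--             end = len(text)
--             while len(text[start:end].encode("utf-8")) > max_bytes and end > start:
--                 end -= 200
--             if end <= start:
--                 end = min(len(text), start + 500)
--             chunks.append(text[start:end])
--             start = end
--
--     if current:
--         chunks.append("\n\n".join(current))
--     return chunks
-- ===== SOURCE B (Python) =====
-- def chunk_markdown_by_bytes(content: str, max_bytes: int) -> list[str]:
--     if len(content.encode("utf-8")) <= max_bytes:
--         return [content]
--
--     paragraphs = content.split("\n\n")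
--     chunks: list[str] = []
--     current: list[str] = []
--     cur_bytes = 0  # byte length of "\n\n".join(current); 0 when current is empty
--
--     for paragraph in paragraphs:
--         p_bytes = len(paragraph.encode("utf-8"))
--         cand_bytes = cur_bytes + 2 + p_bytes if current else p_bytes
--         if cand_bytes <= max_bytes:
--             current.append(paragraph)
--             cur_bytes = cand_bytes
--             continue
--         if current:
--             chunks.append("\n\n".join(current))
--             current = []
--             cur_bytes = 0
--         if p_bytes <= max_bytes:
--             current = [paragraph]
--             cur_bytes = p_bytes
--             continue
--         # oversized paragraph: O(1) slice byte lengths (prefix sums unless pure ASCII),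
--         # binary search over the 200-step grid instead of a linear scan
--         n = len(paragraph)
--         bl = None  # None: ASCII, bytes(paragraph[a:b]) == b - a
--         if p_bytes != n:
--             bl = [0]
--             for ch in paragraph:
--                 bl.append(bl[-1] + len(ch.encode("utf-8")))
--         start = 0
--         while start < n:
--             # least k with (n - 200k <= start) or bytes(paragraph[start:n-200k]) <= max_bytes
--             lo, hi = 0, (n - start + 199) // 200
--             while lo < hi:
--                 mid = (lo + hi) // 2
--                 e = n - 200 * mid
--                 if e <= start or (e - start if bl is None else bl[e] - bl[start]) <= max_bytes:
--                     hi = mid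
--                 else:
--                     lo = mid + 1
--             end = n - 200 * lo
--             if end <= start:
--                 end = min(n, start + 500)
--             chunks.append(paragraph[start:end])
--             start = end
--
--     if current:
--         chunks.append("\n\n".join(current))
--     return chunks
-- ===== Notes on version B (the rewrite author's own statement) =====
-- stated objective: faster
-- what changed: Replaces A's repeated join+re-encode of the growing current chunk with an incrementally maintained byte count, and replaces A's O(n)-per-probe slice-and-encode 200-step inner scan with O(1) slice byte lengths (arithmetic for pure-ASCII paragraphs, prefix byte sums otherwise) plus a binary search over the same 200-step grid.
import Mathlib
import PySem

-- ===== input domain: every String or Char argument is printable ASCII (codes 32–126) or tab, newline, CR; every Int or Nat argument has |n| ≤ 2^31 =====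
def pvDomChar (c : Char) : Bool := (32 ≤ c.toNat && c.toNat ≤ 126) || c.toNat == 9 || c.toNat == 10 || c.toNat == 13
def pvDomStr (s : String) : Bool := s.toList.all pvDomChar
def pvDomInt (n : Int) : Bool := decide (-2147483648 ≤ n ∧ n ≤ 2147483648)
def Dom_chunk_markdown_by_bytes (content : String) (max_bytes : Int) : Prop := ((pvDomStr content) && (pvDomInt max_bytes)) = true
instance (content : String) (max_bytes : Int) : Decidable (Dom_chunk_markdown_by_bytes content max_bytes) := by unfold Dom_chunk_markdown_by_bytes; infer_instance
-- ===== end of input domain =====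

-- B replaces A's repeated join+re-encode of the growing chunk by an incrementally
-- maintained byte count, and A's slice-and-encode 200-step inner scan by prefix byte
-- sums plus a binary search over the same 200-step grid; equal output proved below.

-- ===== PORT A =====
-- helpers shared by both ports: both Pythons call len(x.encode("utf-8")) and "\n\n"
def pvU8 (c : Char) : Nat :=
  if c.toNat < 128 then 1 else if c.toNat < 2048 then 2 else if c.toNat < 65536 then 3 else 4
def pvEncLen (s : List Char) : Nat := (s.map pvU8).sum

-- A's inner while: end -= 200 while the slice is over budget and end > start
def pvAFindEnd (text : List Char) (maxb start e : Int) : Int :=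
  if h : (pvEncLen (PySem.List.slice text (some start) (some e)) : Int) > maxb ∧ e > start
  then pvAFindEnd text maxb start (e - 200) else e
termination_by (e - start).toNat
decreasing_by omega

-- A's outer while over an oversized paragraph
def pvASplitLong (text : List Char) (maxb : Int) (start : Int) : List (List Char) :=
  if h : start < (text.length : Int) then
    let e0 := pvAFindEnd text maxb start (text.length : Int)
    let e1 := if e0 ≤ start then min (text.length : Int) (start + 500) else e0
    PySem.List.slice text (some start) (some e1) :: pvASplitLong text maxb e1
  else []
termination_by ((text.length : Int) - start).toNat
decreasing_by
  split <;> omega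

def pvNN : List Char := '\n' :: '\n' :: []

def pvAStep (maxb : Int) (st : List (List Char) × List (List Char)) (p : List Char) :
    List (List Char) × List (List Char) :=
  let chunks := st.1
  let current := st.2
  let candidate := if current ≠ [] then PySem.Chars.join pvNN (current ++ [p]) else p
  if (pvEncLen candidate : Int) ≤ maxb then (chunks, current ++ [p])
  else
    let chunks := if current ≠ [] then chunks ++ [PySem.Chars.join pvNN current] else chunks
    if (pvEncLen p : Int) ≤ maxb then (chunks, [p])
    else (chunks ++ pvASplitLong p maxb 0, [])

def chunk_markdown_by_bytes (content : String) (max_bytes : Int) : List String :=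
  if (pvEncLen content.toList : Int) ≤ max_bytes then [content]
  else
    let paragraphs := PySem.Chars.splitOn content.toList pvNN
    let st := paragraphs.foldl (pvAStep max_bytes) ([], [])
    let chunks := if st.2 ≠ [] then st.1 ++ [PySem.Chars.join pvNN st.2] else st.1
    chunks.map String.ofList

-- ===== PORT B =====
-- bl[-1] / bl[e]: Python indexing; the default of getD is never used on B's in-range indices
def pvGet0 (bl : List Nat) (e : Int) : Nat := (PySem.List.pyGet? bl e).getD 0

def pvBL (text : List Char) : List Nat :=
  text.foldl (fun bl c => bl ++ [pvGet0 bl (-1) + pvU8 c]) [0]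

-- '(e - start if bl is None else bl[e] - bl[start])'
def pvSpan (bl? : Option (List Nat)) (start e : Int) : Int :=
  match bl? with
  | none => e - start
  | some bl => (pvGet0 bl e : Int) - (pvGet0 bl start : Int)

def pvBSearch (bl? : Option (List Nat)) (n start maxb : Int) (lo hi : Nat) : Nat :=
  if h : lo < hi then
    let mid := (lo + hi) / 2
    let e : Int := n - 200 * (mid : Int)
    if e ≤ start ∨ pvSpan bl? start e ≤ maxb
    then pvBSearch bl? n start maxb lo mid
    else pvBSearch bl? n start maxb (mid + 1) hi
  else lo
termination_by hi - lo
decreasing_by all_goals omega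

def pvBSplitLong (text : List Char) (bl? : Option (List Nat)) (maxb : Int) (start : Int) : List (List Char) :=
  if h : start < (text.length : Int) then
    let n : Int := (text.length : Int)
    let hi := (PySem.Int.floordiv (n - start + 199) 200).toNat
    let k := pvBSearch bl? n start maxb 0 hi
    let e0 : Int := n - 200 * (k : Int)
    let e1 := if e0 ≤ start then min n (start + 500) else e0
    PySem.List.slice text (some start) (some e1) :: pvBSplitLong text bl? maxb e1
  else []
termination_by ((text.length : Int) - start).toNat
decreasing_by
  split <;> omega

def pvBStep (maxb : Int) (st : List (List Char) × List (List Char) × Nat) (p : List Char) :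
    List (List Char) × List (List Char) × Nat :=
  let chunks := st.1
  let current := st.2.1
  let curB := st.2.2
  let pB := pvEncLen p
  let candB := if current ≠ [] then curB + 2 + pB else pB
  if (candB : Int) ≤ maxb then (chunks, current ++ [p], candB)
  else
    let chunks := if current ≠ [] then chunks ++ [PySem.Chars.join pvNN current] else chunks
    if (pB : Int) ≤ maxb then (chunks, [p], pB)
    else
      -- 'bl = None; if p_bytes != n: bl = [0]; for ch in paragraph: ...'
      let bl? : Option (List Nat) := if pB ≠ p.length then some (pvBL p) else none
      (chunks ++ pvBSplitLong p bl? maxb 0, [], 0)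

def chunk_markdown_by_bytes_alt (content : String) (max_bytes : Int) : List String :=
  if (pvEncLen content.toList : Int) ≤ max_bytes then [content]
  else
    let paragraphs := PySem.Chars.splitOn content.toList pvNN
    let st := paragraphs.foldl (pvBStep max_bytes) ([], [], 0)
    let chunks := if st.2.1 ≠ [] then st.1 ++ [PySem.Chars.join pvNN st.2.1] else st.1
    chunks.map String.ofList


-- ===== PRECONDITION & SPEC =====
def Spec_chunk_markdown_by_bytes (content : String) (max_bytes : Int) (out : List String) : Prop := out = chunk_markdown_by_bytes_alt content max_bytes
instance (content : String) (max_bytes : Int) (out : List String) : Decidable (Spec_chunk_markdown_by_bytes content max_bytes out) := by unfold Spec_chunk_markdown_by_bytes; infer_instance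

-- ===== CLAIM (what is proved, stated in full; the proofs are below) =====
def Claim_equal_chunk_markdown_by_bytes : Prop := ∀ (content : String) (max_bytes : Int), Dom_chunk_markdown_by_bytes content max_bytes → Spec_chunk_markdown_by_bytes content max_bytes (chunk_markdown_by_bytes content max_bytes)

-- ===== LEMMAS AND PROOFS =====
def pvJoinB (xs : List (List Char)) : Nat :=
  if xs = [] then 0 else pvEncLen (PySem.Chars.join pvNN xs)

lemma pvEncLen_append (a b : List Char) : pvEncLen (a ++ b) = pvEncLen a + pvEncLen b := by
  simp [pvEncLen]

lemma pvJoin_snoc (xs : List (List Char)) (p : List Char) (h : xs ≠ []) :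
    pvEncLen (PySem.Chars.join pvNN (xs ++ [p]))
      = pvEncLen (PySem.Chars.join pvNN xs) + 2 + pvEncLen p := by
  induction xs with
  | nil => simp at h
  | cons x xs ih =>
    cases xs with
    | nil =>
      simp only [List.cons_append, List.nil_append, PySem.Chars.join_cons_cons,
        PySem.Chars.join_singleton, pvEncLen_append]
      have : pvEncLen pvNN = 2 := by decide
      omega
    | cons y ys =>
      simp only [List.cons_append, PySem.Chars.join_cons_cons, pvEncLen_append]
      have := ih (by simp)
      simp only [List.cons_append] at this ⊢
      omega

def pvBLspec (s : List Char) : List Nat :=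
  (List.range (s.length + 1)).map (fun i => pvEncLen (s.take i))

lemma pvBLspec_last (s : List Char) : PySem.List.pyGet? (pvBLspec s) (-1) = some (pvEncLen s) := by
  have : pvBLspec s = (List.range s.length).map (fun i => pvEncLen (s.take i)) ++ [pvEncLen s] := by
    simp [pvBLspec, List.range_succ]
  rw [this]
  simp [PySem.List.pyGet?, PySem.List.pyIdx?]

lemma pvBLspec_snoc (s : List Char) (c : Char) :
    pvBLspec (s ++ [c]) = pvBLspec s ++ [pvEncLen s + pvU8 c] := by
  simp only [pvBLspec, List.length_append, List.length_cons, List.length_nil, Nat.zero_add,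
    List.range_succ, List.map_append]
  have h1 : ∀ i ∈ List.range s.length,
      pvEncLen (List.take i (s ++ [c])) = pvEncLen (List.take i s) := by
    intro i hi
    rw [List.take_append_of_le_length (by simp at hi; omega)]
  rw [List.map_congr_left h1]
  simp only [List.map_cons, List.map_nil]
  rw [List.take_append_of_le_length (by omega)]
  have h2 : List.take (s.length + 1) (s ++ [c]) = s ++ [c] := by
    apply List.take_of_length_le; simp
  rw [h2, pvEncLen_append]
  simp [pvEncLen]

lemma pvBL_eq (t : List Char) : pvBL t = pvBLspec t := by
  suffices h : ∀ (t s : List Char),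
      t.foldl (fun bl c => bl ++ [pvGet0 bl (-1) + pvU8 c]) (pvBLspec s) = pvBLspec (s ++ t) by
    have := h t []
    simpa [pvBL, pvBLspec] using this
  intro t
  induction t with
  | nil => simp
  | cons c t ih =>
    intro s
    simp only [List.foldl_cons]
    have hstep : pvBLspec s ++ [pvGet0 (pvBLspec s) (-1) + pvU8 c] = pvBLspec (s ++ [c]) := by
      rw [pvBLspec_snoc]; simp [pvGet0, pvBLspec_last]
    rw [hstep, ih]
    simp

lemma pvGet0_bl (t : List Char) (e : Int) (h0 : 0 ≤ e) (h1 : e ≤ (t.length : Int)) :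
    pvGet0 (pvBL t) e = pvEncLen (t.take e.toNat) := by
  rw [pvBL_eq, pvGet0]
  have he : e = ((e.toNat : Nat) : Int) := by omega
  rw [he]
  simp only [pysem]
  rw [List.getElem?_eq_getElem (by simp [pvBLspec]; omega)]
  simp only [pvBLspec, List.getElem_map, List.getElem_range, Option.getD_some, Int.toNat_natCast]

lemma pvEncLen_take_mono (t : List Char) (a b : Nat) (h : a ≤ b) :
    pvEncLen (t.take a) ≤ pvEncLen (t.take b) := by
  have : b = a + (b - a) := by omega
  rw [this, List.take_add, pvEncLen_append]
  omega

lemma pvSlice_bytes (t : List Char) (s e : Int) (h0 : 0 ≤ s) (h1 : s ≤ e) (h2 : e ≤ (t.length : Int)) :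
    pvEncLen (t.take s.toNat) + pvEncLen (PySem.List.slice t (some s) (some e))
      = pvEncLen (t.take e.toNat) := by
  rw [PySem.List.slice_of_nonneg t h0 (by omega) (by omega) h2]
  have h3 : e.toNat = s.toNat + (e.toNat - s.toNat) := by omega
  conv_rhs => rw [h3]
  rw [List.take_add, pvEncLen_append]

def pvP (t : List Char) (maxb s : Int) (k : Nat) : Prop :=
  (t.length : Int) - 200 * k ≤ s ∨
    (pvEncLen (PySem.List.slice t (some s) (some ((t.length : Int) - 200 * k))) : Int) ≤ maxb

def pvQ (bl? : Option (List Nat)) (n s maxb : Int) (k : Nat) : Prop :=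
  n - 200 * k ≤ s ∨ pvSpan bl? s (n - 200 * k) ≤ maxb

lemma pvEncLen_ge_length (l : List Char) : l.length ≤ pvEncLen l := by
  induction l with
  | nil => simp [pvEncLen]
  | cons c l ih =>
    have : 1 ≤ pvU8 c := by unfold pvU8; split_ifs <;> omega
    simp only [pvEncLen, List.map_cons, List.sum_cons, List.length_cons] at ih ⊢
    omega

lemma pvSpan_eq (t : List Char) (bl? : Option (List Nat))
    (hbl : bl? = none → pvEncLen t = t.length)
    (hbl2 : ∀ bl, bl? = some bl → bl = pvBL t)
    (s e : Int) (h0 : 0 ≤ s) (h1 : s ≤ e) (h2 : e ≤ (t.length : Int)) :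
    pvSpan bl? s e = (pvEncLen (PySem.List.slice t (some s) (some e)) : Int) := by
  cases hcase : bl? with
  | none =>
    have hascii := hbl hcase
    simp only [pvSpan]
    have hsl : PySem.List.slice t (some s) (some e)
        = List.take (e.toNat - s.toNat) (List.drop s.toNat t) :=
      PySem.List.slice_of_nonneg t h0 (by omega) (by omega) h2
    have hsplit1 : t = List.take s.toNat t ++
        (List.take (e.toNat - s.toNat) (List.drop s.toNat t) ++
          List.drop (e.toNat - s.toNat) (List.drop s.toNat t)) := by
      rw [List.take_append_drop, List.take_append_drop]
    have hlen1 : (List.take s.toNat t).length = s.toNat := by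
      simp; omega
    have hlen2 : (List.take (e.toNat - s.toNat) (List.drop s.toNat t)).length
        = e.toNat - s.toNat := by
      simp; omega
    have htot : pvEncLen t = pvEncLen (List.take s.toNat t)
        + pvEncLen (List.take (e.toNat - s.toNat) (List.drop s.toNat t))
        + pvEncLen (List.drop (e.toNat - s.toNat) (List.drop s.toNat t)) := by
      conv_lhs => rw [hsplit1]
      rw [pvEncLen_append, pvEncLen_append]
      omega
    have hg1 := pvEncLen_ge_length (List.take s.toNat t)
    have hg2 := pvEncLen_ge_length (List.take (e.toNat - s.toNat) (List.drop s.toNat t))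
    have hg3 := pvEncLen_ge_length (List.drop (e.toNat - s.toNat) (List.drop s.toNat t))
    have hlen : t.length = (List.take s.toNat t).length
        + ((List.take (e.toNat - s.toNat) (List.drop s.toNat t)).length
          + (List.drop (e.toNat - s.toNat) (List.drop s.toNat t)).length) := by
      conv_lhs => rw [hsplit1]
      simp only [List.length_append]
    rw [hsl]
    omega
  | some bl =>
    have hb := hbl2 bl hcase
    subst hb
    simp only [pvSpan]
    have hbytes := pvSlice_bytes t s e h0 h1 h2
    rw [pvGet0_bl t e (by omega) h2, pvGet0_bl t s h0 (by omega)]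
    omega

lemma pvP_exists (t : List Char) (maxb s : Int) (_hs : 0 ≤ s) : ∃ k, pvP t maxb s k := by
  refine ⟨((t.length : Int) - s).toNat, Or.inl ?_⟩
  omega

lemma pvP_iff_pvQ (t : List Char) (bl? : Option (List Nat))
    (hbl : bl? = none → pvEncLen t = t.length)
    (hbl2 : ∀ bl, bl? = some bl → bl = pvBL t)
    (maxb s : Int) (h0 : 0 ≤ s) (h1 : s ≤ (t.length : Int)) (k : Nat) :
    pvP t maxb s k ↔ pvQ bl? (t.length : Int) s maxb k := by
  by_cases hle : (t.length : Int) - 200 * k ≤ s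
  · exact ⟨fun _ => Or.inl hle, fun _ => Or.inl hle⟩
  · have hspan := pvSpan_eq t bl? hbl hbl2 s ((t.length : Int) - 200 * k)
      h0 (by omega) (by omega)
    unfold pvP pvQ
    rw [hspan]

lemma pvQ_mono (t : List Char) (bl? : Option (List Nat))
    (hbl : bl? = none → pvEncLen t = t.length)
    (hbl2 : ∀ bl, bl? = some bl → bl = pvBL t)
    (maxb s : Int) (h0 : 0 ≤ s) (h1 : s ≤ (t.length : Int))
    {i j : Nat} (hij : i ≤ j) (hi : pvQ bl? (t.length : Int) s maxb i) :
    pvQ bl? (t.length : Int) s maxb j := by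
  by_cases hj : (t.length : Int) - 200 * j ≤ s
  · exact Or.inl hj
  · rcases hi with h | h
    · exact absurd (by omega : (t.length : Int) - 200 * j ≤ s) hj
    · right
      have hji : (t.length : Int) - 200 * j ≤ (t.length : Int) - 200 * i := by omega
      have hii : (t.length : Int) - 200 * i ≤ (t.length : Int) := by omega
      rw [pvSpan_eq t bl? hbl hbl2 s _ h0 (by omega) (by omega)]
      rw [pvSpan_eq t bl? hbl hbl2 s _ h0 (by omega) hii] at h
      have hb1 := pvSlice_bytes t s ((t.length : Int) - 200 * j) h0 (by omega) (by omega)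
      have hb2 := pvSlice_bytes t s ((t.length : Int) - 200 * i) h0 (by omega) hii
      have := pvEncLen_take_mono t ((t.length : Int) - 200 * j).toNat
        ((t.length : Int) - 200 * i).toNat (by omega)
      omega

lemma pvAFindEnd_char (t : List Char) (maxb s : Int) (kmin : Nat)
    (hkP : pvP t maxb s kmin) (hkmin : ∀ i < kmin, ¬ pvP t maxb s i) :
    ∀ d j, kmin - j ≤ d → (∀ i < j, ¬ pvP t maxb s i) →
      pvAFindEnd t maxb s ((t.length : Int) - 200 * j) = (t.length : Int) - 200 * (kmin : Nat) := by
  intro d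
  induction d with
  | zero =>
    intro j hd hj
    have hfind : kmin = j := by
      have h1 : j ≤ kmin := by
        by_contra hc
        exact hj _ (by omega) hkP
      omega
    rw [pvAFindEnd]
    have hPj : pvP t maxb s j := hfind ▸ hkP
    rw [dif_neg]
    · rw [hfind]
    · unfold pvP at hPj; rintro ⟨hgt, hgt2⟩; rcases hPj with h | h
      · omega
      · omega
  | succ d ih =>
    intro j hd hj
    by_cases hPj : pvP t maxb s j
    · have hfind : kmin = j := by
        have h1 : j ≤ kmin := by
          by_contra hc
          exact hj _ (by omega) hkP
        have h2 : kmin ≤ j := by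
          by_contra hc
          exact hkmin j (by omega) hPj
        omega
      rw [pvAFindEnd, dif_neg]
      · rw [hfind]
      · unfold pvP at hPj; rintro ⟨hgt, hgt2⟩; rcases hPj with h | h
        · omega
        · omega
    · have hfind_gt : j < kmin := by
        by_contra hc
        rcases Nat.eq_or_lt_of_le (by omega : kmin ≤ j) with he | hl
        · exact hPj (he ▸ hkP)
        · exact absurd hkP (hj _ hl)
      rw [pvAFindEnd, dif_pos]
      · have harg : (t.length : Int) - 200 * j - 200 = (t.length : Int) - 200 * (j + 1 : Nat) := by
          push_cast; ring
        rw [harg]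
        exact ih (j + 1) (by omega) (by
          intro i hi
          rcases Nat.lt_or_ge i j with h | h
          · exact hj i h
          · have : i = j := by omega
            exact this ▸ hPj)
      · constructor
        · by_contra hc
          exact hPj (Or.inr (by omega))
        · by_contra hc
          exact hPj (Or.inl (by omega))

lemma pvBSearch_char (bl? : Option (List Nat)) (n s maxb : Int)
    (mono : ∀ i j : Nat, i ≤ j → pvQ bl? n s maxb i → pvQ bl? n s maxb j)
    (kmin : Nat) (hkQ : pvQ bl? n s maxb kmin) (hkmin : ∀ i < kmin, ¬ pvQ bl? n s maxb i) :
    ∀ d lo hi, hi - lo ≤ d → lo ≤ hi → (∀ i < lo, ¬ pvQ bl? n s maxb i) → pvQ bl? n s maxb hi →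
      pvBSearch bl? n s maxb lo hi = kmin := by
  intro d
  induction d with
  | zero =>
    intro lo hi hd hle hlo hhi
    have : lo = hi := by omega
    subst this
    rw [pvBSearch, dif_neg (by omega)]
    have h1 : kmin ≤ lo := by
      by_contra hc
      exact hkmin lo (by omega) hhi
    have h2 : lo ≤ kmin := by
      by_contra hc
      exact hlo kmin (by omega) hkQ
    omega
  | succ d ih =>
    intro lo hi hd hle hlo hhi
    rw [pvBSearch]
    by_cases hlt : lo < hi
    · rw [dif_pos hlt]
      set mid := (lo + hi) / 2 with hmid
      have hmid1 : lo ≤ mid := by omega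
      have hmid2 : mid < hi := by omega
      by_cases hQ : pvQ bl? n s maxb mid
      · rw [if_pos]
        · exact ih lo mid (by omega) hmid1 hlo hQ
        · rcases hQ with h | h
          · exact Or.inl h
          · exact Or.inr h
      · rw [if_neg]
        · refine ih (mid + 1) hi (by omega) (by omega) ?_ hhi
          intro i hi'
          rcases Nat.lt_or_ge i lo with h | h
          · exact hlo i h
          · intro hQi
            exact hQ (mono i mid (by omega) hQi)
        · intro hc
          exact hQ (by
            rcases hc with h | h
            · exact Or.inl h
            · exact Or.inr h)
    · rw [dif_neg hlt]
      have : lo = hi := by omega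
      subst this
      have h1 : kmin ≤ lo := by
        by_contra hc
        exact hkmin lo (by omega) hhi
      have h2 : lo ≤ kmin := by
        by_contra hc
        exact hlo kmin (by omega) hkQ
      omega

lemma pvSplitLong_eq (t : List Char) (bl? : Option (List Nat))
    (hbl : bl? = none → pvEncLen t = t.length)
    (hbl2 : ∀ bl, bl? = some bl → bl = pvBL t) (maxb : Int) :
    ∀ m s, (((t.length : Int) - s).toNat ≤ m) → 0 ≤ s →
      pvASplitLong t maxb s = pvBSplitLong t bl? maxb s := by
  intro m
  induction m with
  | zero =>
    intro s hm hs
    rw [pvASplitLong, pvBSplitLong, dif_neg (by omega), dif_neg (by omega)]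
  | succ m ih =>
    intro s hm hs
    by_cases hlt : s < (t.length : Int)
    case neg => rw [pvASplitLong, pvBSplitLong, dif_neg hlt, dif_neg hlt]
    case pos =>
    have hsle : s ≤ (t.length : Int) := le_of_lt hlt
    have hexP := pvP_exists t maxb s hs
    haveI : DecidablePred (pvP t maxb s) := fun _ => Classical.dec _
    set kmin := Nat.find hexP with hk
    have hkP : pvP t maxb s kmin := Nat.find_spec hexP
    have hkminP : ∀ i < kmin, ¬ pvP t maxb s i := fun i hi => Nat.find_min hexP hi
    have hkQ : pvQ bl? (t.length : Int) s maxb kmin :=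
      (pvP_iff_pvQ t bl? hbl hbl2 maxb s hs hsle kmin).mp hkP
    have hkminQ : ∀ i < kmin, ¬ pvQ bl? (t.length : Int) s maxb i :=
      fun i hi hQ => hkminP i hi ((pvP_iff_pvQ t bl? hbl hbl2 maxb s hs hsle i).mpr hQ)
    have hA : pvAFindEnd t maxb s (t.length : Int)
        = (t.length : Int) - 200 * (kmin : Nat) := by
      have := pvAFindEnd_char t maxb s kmin hkP hkminP kmin 0 (by omega)
        (fun i hi => absurd hi (Nat.not_lt_zero i))
      simpa using this
    have hhiQ : pvQ bl? (t.length : Int) s maxb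
        ((PySem.Int.floordiv ((t.length : Int) - s + 199) 200).toNat) := by
      left
      rw [PySem.Int.floordiv_eq_ediv_of_pos (by norm_num)]
      omega
    have hB : pvBSearch bl? (t.length : Int) s maxb 0
          ((PySem.Int.floordiv ((t.length : Int) - s + 199) 200).toNat) = kmin :=
      pvBSearch_char _ _ _ _ (fun i j hij => pvQ_mono t bl? hbl hbl2 maxb s hs hsle hij)
        kmin hkQ hkminQ _ 0 _
        le_rfl (by omega) (fun i h => absurd h (Nat.not_lt_zero i)) hhiQ
    rw [pvASplitLong, pvBSplitLong, dif_pos hlt, dif_pos hlt]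
    simp only [hA, hB]
    set e0 : Int := (t.length : Int) - 200 * (kmin : Nat) with he0
    set e1 : Int := if e0 ≤ s then min (t.length : Int) (s + 500) else e0 with he1
    have he1gt : s < e1 := by
      rw [he1]; split <;> omega
    congr 1
    exact ih e1 (by omega) (by omega)

def pvRel (a : List (List Char) × List (List Char))
    (b : List (List Char) × List (List Char) × Nat) : Prop :=
  b.1 = a.1 ∧ b.2.1 = a.2 ∧ b.2.2 = pvJoinB a.2

lemma pvStep_rel (maxb : Int) (st : List (List Char) × List (List Char))
    (st' : List (List Char) × List (List Char) × Nat) (p : List Char) (h : pvRel st st') :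
    pvRel (pvAStep maxb st p) (pvBStep maxb st' p) := by
  obtain ⟨h1, h2, h3⟩ := h
  unfold pvAStep pvBStep
  rw [h1, h2, h3]
  by_cases hc : st.2 = []
  · have hsplit := pvSplitLong_eq p (if pvEncLen p ≠ p.length then some (pvBL p) else none)
      (by intro hx; split_ifs at hx with h; exact not_not.mp h)
      (by intro bl hx
          by_cases h : pvEncLen p ≠ p.length
          · rw [if_pos h] at hx; exact (Option.some.inj hx).symm
          · rw [if_neg h] at hx; exact absurd hx (by simp))
      maxb p.length 0 (by simp) le_rfl
    simp only [ne_eq, ite_not] at hsplit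
    simp only [hc, pvJoinB, ne_eq, not_true_eq_false, if_false]
    split_ifs with hb <;>
      simp [*, pvRel, pvJoinB, PySem.Chars.join_singleton]
  · simp only [ne_eq, hc, not_false_eq_true, if_true]
    have hJ : pvJoinB st.2 + 2 + pvEncLen p = pvEncLen (PySem.Chars.join pvNN (st.2 ++ [p])) := by
      rw [pvJoinB, if_neg hc, pvJoin_snoc st.2 p hc]
    rw [hJ]
    have hsplit := pvSplitLong_eq p (if pvEncLen p ≠ p.length then some (pvBL p) else none)
      (by intro hx; split_ifs at hx with h; exact not_not.mp h)
      (by intro bl hx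
          by_cases h : pvEncLen p ≠ p.length
          · rw [if_pos h] at hx; exact (Option.some.inj hx).symm
          · rw [if_neg h] at hx; exact absurd hx (by simp))
      maxb p.length 0 (by simp) le_rfl
    simp only [ne_eq, ite_not] at hsplit
    split_ifs with hb1 hb2 <;>
      simp [*, pvRel, pvJoinB, PySem.Chars.join_singleton]

lemma pvFold_rel (maxb : Int) (ps : List (List Char)) :
    ∀ st st', pvRel st st' →
      pvRel (ps.foldl (pvAStep maxb) st) (ps.foldl (pvBStep maxb) st') := by
  induction ps with
  | nil => intro st st' h; exact h
  | cons p ps ih =>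
    intro st st' h
    exact ih _ _ (pvStep_rel maxb st st' p h)


-- ===== VERDICT (by name: the statement is the Claim_ definition above) =====
theorem chunk_markdown_by_bytes_spec : Claim_equal_chunk_markdown_by_bytes := by
  unfold Claim_equal_chunk_markdown_by_bytes
  intro content max_bytes _hdom
  unfold Spec_chunk_markdown_by_bytes chunk_markdown_by_bytes chunk_markdown_by_bytes_alt
  by_cases h : (pvEncLen content.toList : Int) ≤ max_bytes
  · rw [if_pos h, if_pos h]
  · rw [if_neg h, if_neg h]
    have hrel := pvFold_rel max_bytes (PySem.Chars.splitOn content.toList pvNN)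
      ([], []) ([], [], 0) ⟨rfl, rfl, by simp [pvJoinB]⟩
    obtain ⟨h1, h2, _h3⟩ := hrel
    simp only [h1, h2]
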